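-- pv_equiv track=rewrite | github.com/armaxri/vscode-clang-call-graph | scripts/create_clang_json.py | adjust_id_lines
-- ===== SOURCE A (Python) =====
-- def split_json_line(line):
--     """Split a json line into its components."""
--     string_components = line.split('": "')
--     if string_components[1][-1] == ",":
--         right_string = string_components[1][:-2]
--         end_char = ","
--     else:
--         right_string = string_components[1][:-1]
--         end_char = ""
--
--     return string_components[0], right_string, end_char
--
-- def adjust_id_lines(json_lines):
--     """Adjust the ids of the json file."""
--     new_lines = []
--     known_ids = {}
--
--     def get_known_id(old_id):
--         if old_id not in known_ids.keys():
--             known_ids[old_id] = known_ids.__len__() + 1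
--         return known_ids[old_id]
--
--     for line in json_lines:
--         if '  "id": "' in line:
--             left_string, old_id, end_char = split_json_line(line)
--             new_lines.append(
--                 left_string
--                 + '": "0x'
--                 + format(get_known_id(old_id), f"0{16}x")
--                 + '"'
--                 + end_char
--             )
--         elif '  "previousDecl": "' in line:
--             left_string, old_id, end_char = split_json_line(line)
--             new_lines.append(
--                 left_string
--                 + '": "0x'
--                 + format(get_known_id(old_id), f"0{16}x")
--                 + '"'
--                 + end_char
--             )
--         elif '  "referencedMemberDecl": "' in line:
--             left_string, old_id, end_char = split_json_line(line)
--             new_lines.append(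
--                 left_string
--                 + '": "0x'
--                 + format(get_known_id(old_id), f"0{16}x")
--                 + '"'
--                 + end_char
--             )
--         else:
--             new_lines.append(line)
--
--     return new_lines
-- ===== SOURCE B (Python) =====
-- def split_json_line(line):
--     """Split a json line into its components."""
--     string_components = line.split('": "')
--     if string_components[1][-1] == ",":
--         right_string = string_components[1][:-2]
--         end_char = ","
--     else:
--         right_string = string_components[1][:-1]
--         end_char = ""
--
--     return string_components[0], right_string, end_char
--
--
-- _MARKERS = ('  "id": "', '  "previousDecl": "', '  "referencedMemberDecl": "')
--
--
-- def adjust_id_lines(json_lines):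
--     """Adjust the ids of the json file."""
--     # pass 1: register each id in order of first appearance -> sequential number
--     mapping = {}
--     for line in json_lines:
--         if any(marker in line for marker in _MARKERS):
--             _, old_id, _ = split_json_line(line)
--             if old_id not in mapping:
--                 mapping[old_id] = len(mapping) + 1
--     # pass 2: rewrite the matching lines with the precomputed mapping
--     out = []
--     for line in json_lines:
--         if any(marker in line for marker in _MARKERS):
--             left_string, old_id, end_char = split_json_line(line)
--             out.append(left_string + '": "0x' + format(mapping[old_id], "016x") + '"' + end_char)
--         else:
--             out.append(line)
--     return out
-- ===== Notes on version B (the rewrite author's own statement) =====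
-- stated objective: alternative
-- what changed: A single pass carrying a growing (output, id-dict) state with triplicated branch bodies is replaced by two passes: first build the first-seen id numbering, then map each line through the finished mapping.
import Mathlib
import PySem

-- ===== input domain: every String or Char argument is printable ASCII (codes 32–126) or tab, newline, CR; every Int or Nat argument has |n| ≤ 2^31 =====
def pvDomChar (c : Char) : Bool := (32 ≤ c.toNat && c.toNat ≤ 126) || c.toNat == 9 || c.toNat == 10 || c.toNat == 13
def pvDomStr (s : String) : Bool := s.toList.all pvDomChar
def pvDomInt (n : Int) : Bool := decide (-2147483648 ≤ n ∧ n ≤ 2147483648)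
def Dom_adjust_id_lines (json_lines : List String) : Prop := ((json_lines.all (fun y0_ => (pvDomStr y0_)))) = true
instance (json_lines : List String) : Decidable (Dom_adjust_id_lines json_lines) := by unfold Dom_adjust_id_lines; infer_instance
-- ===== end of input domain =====

-- B replaces A's single pass over a growing (output, id-dict) state (with a triplicated branch
-- body) by two passes: build the first-seen id numbering first, then map every line through the
-- finished mapping. Same cost; return value proved equal on Pre_.

-- ===== PORT A =====
-- shared module helper: split_json_line (both Pythons use it verbatim).
-- none = the IndexError Python raises there (string_components[1] missing or empty).
-- string_components = line.split('": "')  (the separator is nonempty, so split? is some)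
def splitComps (line : String) : List String := (PySem.Str.split? line "\": \"").getD []

def split_json_line? (line : String) : Option (String × String × String) :=
  match PySem.List.pyGet? (splitComps line) 1 with
  | none => none
  | some c1 =>
    match PySem.Str.pyGet? c1 (-1) with
    | none => none
    | some last =>
      if last = ',' then
        some (PySem.List.pyGetD (splitComps line) 0 "", PySem.Str.slice c1 none (some (-2)), ",")
      else
        some (PySem.List.pyGetD (splitComps line) 0 "", PySem.Str.slice c1 none (some (-1)), "")

-- format(n, "016x"): exact for 0 ≤ n (every id written here is ≥ 1)
def hex16 (n : Int) : String := PySem.Str.zfill (String.ofList (Nat.toDigits 16 n.toNat)) 16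

-- the dict mutation of A's get_known_id / of B's first pass:
-- 'if old_id not in d: d[old_id] = len(d) + 1'
def registerId (d : PySem.Dict String Int) (old : String) : PySem.Dict String Int :=
  if d.contains old then d else d.insert old ((d.size : Int) + 1)

-- body of A's three identical marker branches
def adjStepA (st : List String × PySem.Dict String Int) (line : String) :
    List String × PySem.Dict String Int :=
  match split_json_line? line with
  | some (lft, old, e) =>
      let known := registerId st.2 old
      (st.1 ++ [lft ++ "\": \"0x" ++ hex16 (known.getD old 0) ++ "\"" ++ e], known)
  | none => st   -- Python raises IndexError here; excluded by Pre_

def stepA (st : List String × PySem.Dict String Int) (line : String) :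
    List String × PySem.Dict String Int :=
  if PySem.Str.isIn "  \"id\": \"" line then adjStepA st line
  else if PySem.Str.isIn "  \"previousDecl\": \"" line then adjStepA st line
  else if PySem.Str.isIn "  \"referencedMemberDecl\": \"" line then adjStepA st line
  else (st.1 ++ [line], st.2)

def adjust_id_lines (json_lines : List String) : List String :=
  (json_lines.foldl stepA ([], PySem.Dict.empty)).1

-- ===== PORT B =====
def matchesMarker (line : String) : Bool :=
  PySem.Str.isIn "  \"id\": \"" line
  || PySem.Str.isIn "  \"previousDecl\": \"" line
  || PySem.Str.isIn "  \"referencedMemberDecl\": \"" line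

-- pass 1 step: register the id of a matching line
def regStep (d : PySem.Dict String Int) (line : String) : PySem.Dict String Int :=
  if matchesMarker line then
    match split_json_line? line with
    | some (_, old, _) => registerId d old
    | none => d   -- Python raises IndexError here; excluded by Pre_
  else d

-- pass 2: rewrite one line through the finished mapping
def rewriteLine (m : PySem.Dict String Int) (line : String) : String :=
  if matchesMarker line then
    match split_json_line? line with
    | some (lft, old, e) => lft ++ "\": \"0x" ++ hex16 (m.getD old 0) ++ "\"" ++ e
    | none => line
  else line

def adjust_id_lines_alt (json_lines : List String) : List String :=
  json_lines.map (rewriteLine (json_lines.foldl regStep PySem.Dict.empty))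

-- ===== PRECONDITION & SPEC =====
-- Pre_ excludes exactly the inputs containing a marker line with nothing between the first
-- '": "' separator and the line's remainder's first character — there split_json_line indexes
-- an empty string and both A and B raise IndexError. (The length conjunct holds automatically
-- on every marker line, since each marker contains the separator.)
def Pre_adjust_id_lines (json_lines : List String) : Prop :=
  ∀ line ∈ json_lines, matchesMarker line = true →
    1 < (splitComps line).length ∧ (splitComps line).getD 1 "" ≠ ""
instance (json_lines : List String) : Decidable (Pre_adjust_id_lines json_lines) := by
  unfold Pre_adjust_id_lines; infer_instance

def pvWitness_adjust_id_lines : List String :=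
  ["{", "  \"id\": \"0x7b\",", "  \"other\": \"x\",", "  \"previousDecl\": \"0x7b\"", "}"]

def Spec_adjust_id_lines (json_lines : List String) (out : List String) : Prop :=
  out = adjust_id_lines_alt json_lines
instance (json_lines : List String) (out : List String) :
    Decidable (Spec_adjust_id_lines json_lines out) := by
  unfold Spec_adjust_id_lines; infer_instance

-- ===== CLAIM (what is proved, stated in full; the proofs are below) =====
def Claim_equal_adjust_id_lines : Prop :=
  ∀ (json_lines : List String), Dom_adjust_id_lines json_lines →
    Pre_adjust_id_lines json_lines →
    Spec_adjust_id_lines json_lines (adjust_id_lines json_lines)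

-- ===== LEMMAS AND PROOFS =====

-- on a line admitted by Pre_, split_json_line succeeds
theorem split_some_of_pre (line : String)
    (h1 : 1 < (splitComps line).length)
    (h2 : (splitComps line).getD 1 "" ≠ "") :
    ∃ t, split_json_line? line = some t := by
  unfold split_json_line?
  have hget : PySem.List.pyGet? (splitComps line) 1 = some (splitComps line)[1] :=
    PySem.List.pyGet?_ofNat (splitComps line) 1 h1
  rw [hget]
  dsimp only
  have hne : (splitComps line)[1] ≠ "" := by
    rwa [List.getD_eq_getElem _ "" h1] at h2
  have hlast : ∃ c, PySem.Str.pyGet? (splitComps line)[1] (-1) = some c := by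
    have hnil : (splitComps line)[1].toList ≠ [] := by
      intro h; exact hne (String.toList_eq_nil_iff.mp h)
    simp only [PySem.Str.pyGet?_eq, PySem.Chars.pyGet?_eq_listPyGet?,
      PySem.List.pyGet?_neg_one]
    exact Option.isSome_iff_exists.mp (List.getLast?_isSome.mpr hnil)
  obtain ⟨c, hcv⟩ := hlast
  rw [hcv]
  dsimp only
  by_cases hcomma : c = ','
  · exact ⟨_, by rw [if_pos hcomma]⟩
  · exact ⟨_, by rw [if_neg hcomma]⟩

theorem registerId_contains (d : PySem.Dict String Int) (old k : String)
    (h : d.contains k = true) : (registerId d old).contains k = true := by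
  unfold registerId; split_ifs with hc
  · exact h
  · simp [PySem.Dict.contains_insert, h]

theorem registerId_contains_self (d : PySem.Dict String Int) (old : String) :
    (registerId d old).contains old = true := by
  unfold registerId; split_ifs with hc
  · exact hc
  · exact PySem.Dict.contains_insert_self _ _ _

theorem registerId_getD (d : PySem.Dict String Int) (old k : String)
    (h : d.contains k = true) : (registerId d old).getD k 0 = d.getD k 0 := by
  unfold registerId; split_ifs with hc
  · rfl
  · have hne : k ≠ old := by intro he; rw [he] at h; simp [h] at hc
    exact PySem.Dict.getD_insert_of_ne _ _ _ hne

theorem regStep_contains (d : PySem.Dict String Int) (l k : String)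
    (h : d.contains k = true) : (regStep d l).contains k = true := by
  unfold regStep; split_ifs with hm
  · cases hs : split_json_line? l with
    | none => exact h
    | some t => obtain ⟨_, old, _⟩ := t; exact registerId_contains d old k h
  · exact h

theorem regStep_getD (d : PySem.Dict String Int) (l k : String)
    (h : d.contains k = true) : (regStep d l).getD k 0 = d.getD k 0 := by
  unfold regStep; split_ifs with hm
  · cases hs : split_json_line? l with
    | none => rfl
    | some t => obtain ⟨_, old, _⟩ := t; exact registerId_getD d old k h
  · rfl

-- a key already present keeps its value through the rest of pass 1
theorem getD_foldl_regStep (ls : List String) :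
    ∀ (d : PySem.Dict String Int) (k : String), d.contains k = true →
      (ls.foldl regStep d).getD k 0 = d.getD k 0 := by
  induction ls with
  | nil => intro d k _; rfl
  | cons l ls ih =>
    intro d k h
    simp only [List.foldl_cons]
    rw [ih (regStep d l) k (regStep_contains d l k h), regStep_getD d l k h]

theorem stepA_eq (st : List String × PySem.Dict String Int) (line : String) :
    stepA st line =
      if matchesMarker line then adjStepA st line else (st.1 ++ [line], st.2) := by
  unfold stepA matchesMarker
  cases PySem.Str.isIn "  \"id\": \"" line <;>
  cases PySem.Str.isIn "  \"previousDecl\": \"" line <;>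
  cases PySem.Str.isIn "  \"referencedMemberDecl\": \"" line <;> rfl

-- the main invariant: A's fold from any (acc, d) is acc ++ the map through pass 1's final dict
theorem foldA_eq (ls : List String) :
    ∀ (d : PySem.Dict String Int) (acc : List String),
      (∀ line ∈ ls, matchesMarker line = true →
        1 < (splitComps line).length ∧ (splitComps line).getD 1 "" ≠ "") →
      (ls.foldl stepA (acc, d)).1 = acc ++ ls.map (rewriteLine (ls.foldl regStep d)) := by
  induction ls with
  | nil => intro d acc _; simp
  | cons l ls ih =>
    intro d acc hpre
    have hpre_tail : ∀ line ∈ ls, matchesMarker line = true →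
        1 < (splitComps line).length ∧ (splitComps line).getD 1 "" ≠ "" :=
      fun line hm => hpre line (List.mem_cons_of_mem l hm)
    simp only [List.foldl_cons, List.map_cons, stepA_eq]
    by_cases hm : matchesMarker l = true
    · obtain ⟨h1, h2⟩ := hpre l (List.mem_cons_self) hm
      obtain ⟨⟨lft, old, e⟩, hs⟩ := split_some_of_pre l h1 h2
      have hreg : regStep d l = registerId d old := by
        unfold regStep; rw [if_pos hm, hs]
      have hadj : adjStepA (acc, d) l =
          (acc ++ [lft ++ "\": \"0x" ++ hex16 ((registerId d old).getD old 0) ++ "\"" ++ e],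
           registerId d old) := by
        unfold adjStepA; rw [hs]
      rw [if_pos hm, hadj, hreg, ih (registerId d old) _ hpre_tail]
      have hrw : rewriteLine (ls.foldl regStep (registerId d old)) l =
          lft ++ "\": \"0x" ++ hex16 ((registerId d old).getD old 0) ++ "\"" ++ e := by
        unfold rewriteLine
        rw [if_pos hm, hs]
        dsimp only
        rw [getD_foldl_regStep ls (registerId d old) old (registerId_contains_self d old)]
      rw [hrw]; simp
    · have hm' : matchesMarker l = false := by simpa using hm
      have hreg : regStep d l = d := by unfold regStep; rw [hm']; rfl
      have hrw : rewriteLine (ls.foldl regStep d) l = l := by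
        unfold rewriteLine; rw [hm']; rfl
      rw [if_neg (by simp [hm']), hreg, ih d _ hpre_tail, hrw]; simp

-- ===== VERDICT (by name: the statement is the Claim_ definition above) =====
theorem adjust_id_lines_spec : Claim_equal_adjust_id_lines := by
  intro json_lines _hDom hPre
  unfold Spec_adjust_id_lines adjust_id_lines adjust_id_lines_alt
  exact foldA_eq json_lines PySem.Dict.empty [] hPre
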